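-- pv_equiv track=rewrite | github.com/jrasband/extracellular-tyrosines | extracellular-tyrosines.py | countTyr
-- ===== SOURCE A (Python) =====
-- def countTyr(sequence, topoArr, features):
--     i = 0 # count number of extracellular tyrosine residues
--     j = 0 # count number of extracellular amino acids
--     if len(topoArr) == 1:
--         topoDict = topoArr[0]
--         roi = sequence[int(topoDict['begin'])-1:int(topoDict['end'])]
--         i += roi.count('Y')
--         j += len(roi)
--     else:
--         for topoDict in topoArr:
--             if (topoDict['description'] in features):
--                 roi = sequence[int(topoDict['begin'])-1:int(topoDict['end'])]
--                 i += roi.count('Y') # count number of extracellular tyrosine residues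
--                 j += len(roi) # count number of extracellular amino acids
--     return [i,j]
-- ===== SOURCE B (Python) =====
-- def _norm(a, n):
--     # Python slice-index normalization: negative indices wrap from the end, then clamp to [0, n].
--     if a < 0:
--         a += n
--     if a < 0:
--         a = 0
--     if a > n:
--         a = n
--     return a
--
-- def countTyr(sequence, topoArr, features):
--     # Prefix-count table: preY[k] = number of 'Y' in sequence[:k].  Each region then
--     # costs O(1) index arithmetic instead of building and scanning a slice.
--     n = len(sequence)
--     preY = [0]
--     c = 0
--     for ch in sequence:
--         if ch == 'Y':
--             c += 1
--         preY.append(c)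
--     if len(topoArr) == 1:
--         selected = topoArr
--     else:
--         selected = [d for d in topoArr if d['description'] in features]
--     i = 0
--     j = 0
--     for d in selected:
--         lo = _norm(int(d['begin']) - 1, n)
--         hi = _norm(int(d['end']), n)
--         if lo < hi:
--             i += preY[hi] - preY[lo]
--             j += hi - lo
--     return [i, j]
-- ===== Notes on version B (the rewrite author's own statement) =====
-- stated objective: alternative
-- what changed: B builds a prefix table preY of running 'Y'-counts over the sequence once, normalizes each region's slice bounds itself (Python slice semantics), and answers every selected region in O(1) as preY[hi]-preY[lo] and hi-lo, instead of A's building and scanning a string slice per region.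
import Mathlib
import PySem

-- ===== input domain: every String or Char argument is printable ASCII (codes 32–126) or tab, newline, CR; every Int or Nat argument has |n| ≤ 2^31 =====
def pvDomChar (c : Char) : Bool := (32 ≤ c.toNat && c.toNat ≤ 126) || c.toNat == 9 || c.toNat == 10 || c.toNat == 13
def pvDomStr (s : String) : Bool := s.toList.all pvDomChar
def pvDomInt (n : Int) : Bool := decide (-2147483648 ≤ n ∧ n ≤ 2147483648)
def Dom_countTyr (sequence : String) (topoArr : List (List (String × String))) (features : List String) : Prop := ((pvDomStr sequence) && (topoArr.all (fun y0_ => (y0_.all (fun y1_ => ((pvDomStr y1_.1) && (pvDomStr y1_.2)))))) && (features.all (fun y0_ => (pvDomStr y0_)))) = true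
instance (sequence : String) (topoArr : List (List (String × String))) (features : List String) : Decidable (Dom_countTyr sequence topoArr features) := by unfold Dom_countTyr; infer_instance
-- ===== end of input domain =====

-- B replaces per-region slicing and scanning by a prefix-count table of 'Y' built once, answering each region in O(1) index arithmetic (a different algorithm; not measured faster).


-- ===== PORT A =====
-- int(topoDict[k]); the .getD 0 default is only reached outside Pre_countTyr (KeyError / ValueError in Python)
def pvIntAt (d : List (String × String)) (k : String) : Int :=
  ((List.lookup k d).bind PySem.Int.ofStr?).getD 0

-- sequence[int(d['begin'])-1:int(d['end'])]  (A's slice expression)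
def pvRoi (sequence : String) (d : List (String × String)) : String :=
  PySem.Str.slice sequence (some (pvIntAt d "begin" - 1)) (some (pvIntAt d "end"))

-- topoDict['description']; the .getD "" default is only reached outside Pre_countTyr (KeyError in Python)
def pvDesc (d : List (String × String)) : String :=
  (List.lookup "description" d).getD ""

def countTyr (sequence : String) (topoArr : List (List (String × String))) (features : List String) : List Int :=
  match topoArr with
  | [topoDict] =>
      let roi := pvRoi sequence topoDict
      [(0 : Int) + (PySem.Str.count roi "Y" : Int), (0 : Int) + PySem.Str.len roi]
  | _ =>
      let p := topoArr.foldl (fun (p : Int × Int) topoDict =>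
        if features.contains (pvDesc topoDict) then
          let roi := pvRoi sequence topoDict
          (p.1 + (PySem.Str.count roi "Y" : Int), p.2 + PySem.Str.len roi)
        else p) ((0 : Int), (0 : Int))
      [p.1, p.2]

-- ===== PORT B =====
-- _norm(a, n): Python slice-index normalisation (wrap negatives, clamp to [0, n])
def pvNorm (a : Int) (n : Int) : Int :=
  let a1 := if a < 0 then a + n else a
  let a2 := if a1 < 0 then 0 else a1
  if a2 > n then n else a2

-- the preY-building loop of Source B: preY = [0]; c = 0; for ch in sequence: if ch == 'Y': c += 1; preY.append(c)
def pvPreY (l : List Char) : List Int :=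
  (l.foldl (fun (st : List Int × Int) ch =>
      let c := if ch = 'Y' then st.2 + 1 else st.2
      (st.1 ++ [c], c)) ([(0 : Int)], (0 : Int))).1

def countTyr_alt (sequence : String) (topoArr : List (List (String × String))) (features : List String) : List Int :=
  let n : Int := PySem.Str.len sequence
  let preY := pvPreY sequence.toList
  let selected := if topoArr.length == 1 then topoArr
                  else topoArr.filter (fun d => features.contains (pvDesc d))
  let p := selected.foldl (fun (p : Int × Int) d =>
      let lo := pvNorm (pvIntAt d "begin" - 1) n
      let hi := pvNorm (pvIntAt d "end") n
      if lo < hi then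
        (p.1 + (PySem.List.pyGetD preY hi 0 - PySem.List.pyGetD preY lo 0),
         p.2 + (hi - lo))
      else p) ((0 : Int), (0 : Int))
  [p.1, p.2]

-- ===== PRECONDITION & SPEC =====
def pvOkBE (d : List (String × String)) : Bool :=
  ((List.lookup "begin" d).bind PySem.Int.ofStr?).isSome &&
  ((List.lookup "end" d).bind PySem.Int.ofStr?).isSome

-- Pre_ excludes exactly the inputs where Python A raises: a processed dict missing 'begin'/'end'
-- (or with a non-int value there), or — in the multi-region branch — a dict missing 'description' (KeyError/ValueError).
def Pre_countTyr (sequence : String) (topoArr : List (List (String × String))) (features : List String) : Prop :=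
  (if topoArr.length == 1 then pvOkBE (topoArr.headD [])
   else topoArr.all (fun d =>
       (List.lookup "description" d).isSome &&
       (!(features.contains (pvDesc d)) || pvOkBE d))) = true
instance (sequence : String) (topoArr : List (List (String × String))) (features : List String) : Decidable (Pre_countTyr sequence topoArr features) := by unfold Pre_countTyr; infer_instance

def pvWitness_countTyr : String × (List (List (String × String))) × List String :=
  ("AYYBY", [[("begin", "1"), ("end", "3"), ("description", "Extracellular")]], ["Extracellular"])

def Spec_countTyr (sequence : String) (topoArr : List (List (String × String))) (features : List String) (out : List Int) : Prop := out = countTyr_alt sequence topoArr features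
instance (sequence : String) (topoArr : List (List (String × String))) (features : List String) (out : List Int) : Decidable (Spec_countTyr sequence topoArr features out) := by unfold Spec_countTyr; infer_instance

-- ===== CLAIM (what is proved, stated in full; the proofs are below) =====
def Claim_equal_countTyr : Prop := ∀ (sequence : String) (topoArr : List (List (String × String))) (features : List String), Dom_countTyr sequence topoArr features → Pre_countTyr sequence topoArr features → Spec_countTyr sequence topoArr features (countTyr sequence topoArr features)

-- ===== LEMMAS AND PROOFS =====

-- str.count with a single-character needle counts exactly the occurrences of that character
theorem pv_count_go_singleton (c : Char) (l : List Char) (fuel acc : Nat) (h : l.length ≤ fuel) :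
    PySem.Chars.count.go [c] fuel l acc = acc + l.count c := by
  induction l generalizing fuel acc with
  | nil => cases fuel <;> simp [PySem.Chars.count.go]
  | cons hd t ih =>
      cases fuel with
      | zero => simp at h
      | succ n =>
          have ht : t.length ≤ n := by simpa using h
          have hu : PySem.Chars.count.go [c] (n + 1) (hd :: t) acc =
              if [c].isPrefixOf (hd :: t) then PySem.Chars.count.go [c] n t (acc + 1)
              else PySem.Chars.count.go [c] n t acc := rfl
          rw [hu]
          by_cases hc : c = hd
          · subst hc
            simp [List.isPrefixOf, ih n (acc + 1) ht]
            omega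
          · have hb : (c == hd) = false := by simp [hc]
            simp [List.isPrefixOf, hb, Ne.symm hc, ih n acc ht]

theorem pv_chars_count_singleton (c : Char) (s : List Char) :
    PySem.Chars.count s [c] = s.count c := by
  simpa [PySem.Chars.count] using pv_count_go_singleton c s s.length 0 (le_refl _)

theorem pv_str_count_Y (s : String) : PySem.Str.count s "Y" = s.toList.count 'Y' := by
  rw [PySem.Str.count_eq]
  exact pv_chars_count_singleton 'Y' s.toList

-- the prefix-count loop produces exactly the list of prefix counts
theorem pv_preY_fold (l : List Char) (acc : List Int) (c : Int) :
    l.foldl (fun (st : List Int × Int) ch =>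
        let c' := if ch = 'Y' then st.2 + 1 else st.2
        (st.1 ++ [c'], c')) (acc, c)
      = (acc ++ (List.range l.length).map (fun k => c + (((l.take (k+1)).count 'Y' : Nat) : Int)),
         c + ((l.count 'Y' : Nat) : Int)) := by
  induction l generalizing acc c with
  | nil => simp
  | cons ch t ih =>
      simp only [List.foldl_cons]
      rw [ih]
      by_cases hc : ch = 'Y'
      · simp [hc, List.range_succ_eq_map, List.map_map, Function.comp]
        constructor
        · intro a _; ring
        · ring
      · simp [hc, List.range_succ_eq_map, List.map_map, Function.comp]

theorem pv_pvPreY_eq (l : List Char) :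
    pvPreY l = (0 : Int) :: (List.range l.length).map (fun k => (((l.take (k+1)).count 'Y' : Nat) : Int)) := by
  unfold pvPreY
  rw [pv_preY_fold]
  simp

theorem pv_preY_getD (l : List Char) (k : Nat) (hk : k ≤ l.length) :
    (pvPreY l).getD k 0 = (((l.take k).count 'Y' : Nat) : Int) := by
  rw [pv_pvPreY_eq]
  cases k with
  | zero => simp
  | succ m =>
      have hm : m < l.length := by omega
      rw [List.getD_cons_succ]
      rw [List.getD_eq_getElem _ _ (by simpa using hm)]
      simp

-- pvNorm is PySem's slice-index normalisation
theorem pv_pvNorm_eq (a : Int) (n : Nat) :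
    pvNorm a (n : Int) = ((PySem.List.clampIdx n a : Nat) : Int) := by
  simp only [pvNorm, PySem.List.clampIdx]
  split_ifs <;> omega

-- a two-bound slice is clamped drop/take (definitional in PySem)
theorem pv_slice_eq {α : Type} (xs : List α) (a b : Int) :
    PySem.List.slice xs (some a) (some b)
      = (xs.drop (PySem.List.clampIdx xs.length a)).take
          (PySem.List.clampIdx xs.length b - PySem.List.clampIdx xs.length a) := rfl

-- per-region step: A's slice-count-and-length pair equals B's prefix-table arithmetic
theorem pv_step_eq (sequence : String) (d : List (String × String)) (p : Int × Int) :
    (p.1 + (PySem.Str.count (pvRoi sequence d) "Y" : Int), p.2 + PySem.Str.len (pvRoi sequence d))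
      = (if pvNorm (pvIntAt d "begin" - 1) (PySem.Str.len sequence)
            < pvNorm (pvIntAt d "end") (PySem.Str.len sequence) then
           (p.1 + (PySem.List.pyGetD (pvPreY sequence.toList)
                     (pvNorm (pvIntAt d "end") (PySem.Str.len sequence)) 0
                   - PySem.List.pyGetD (pvPreY sequence.toList)
                     (pvNorm (pvIntAt d "begin" - 1) (PySem.Str.len sequence)) 0),
            p.2 + (pvNorm (pvIntAt d "end") (PySem.Str.len sequence)
                   - pvNorm (pvIntAt d "begin" - 1) (PySem.Str.len sequence)))
         else p) := by
  have hn : PySem.Str.len sequence = (sequence.toList.length : Int) := PySem.Str.len_eq sequence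
  set l := sequence.toList with hl
  set N := l.length with hN
  set LO := PySem.List.clampIdx N (pvIntAt d "begin" - 1) with hLO
  set HI := PySem.List.clampIdx N (pvIntAt d "end") with hHI
  have hlo : pvNorm (pvIntAt d "begin" - 1) (PySem.Str.len sequence) = ((LO : Nat) : Int) := by
    rw [hn]; exact pv_pvNorm_eq _ _
  have hhi : pvNorm (pvIntAt d "end") (PySem.Str.len sequence) = ((HI : Nat) : Int) := by
    rw [hn]; exact pv_pvNorm_eq _ _
  have hroi : (pvRoi sequence d).toList = (l.drop LO).take (HI - LO) := by
    show (PySem.Str.slice sequence _ _).toList = _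
    rw [PySem.Str.toList_slice]
    exact pv_slice_eq l _ _
  have hcount : (PySem.Str.count (pvRoi sequence d) "Y" : Int)
      = ((((l.drop LO).take (HI - LO)).count 'Y' : Nat) : Int) := by
    rw [pv_str_count_Y, hroi]
  have hlen : PySem.Str.len (pvRoi sequence d)
      = ((((l.drop LO).take (HI - LO)).length : Nat) : Int) := by
    rw [PySem.Str.len_eq, hroi]
  have hHIle : HI ≤ N := PySem.List.clampIdx_le N _
  have hLOle : LO ≤ N := PySem.List.clampIdx_le N _
  have hgethi : PySem.List.pyGetD (pvPreY l) ((HI : Nat) : Int) 0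
      = (((l.take HI).count 'Y' : Nat) : Int) := by
    rw [PySem.List.pyGetD_of_nonneg _ _ (by positivity)]
    simpa using pv_preY_getD l HI hHIle
  have hgetlo : PySem.List.pyGetD (pvPreY l) ((LO : Nat) : Int) 0
      = (((l.take LO).count 'Y' : Nat) : Int) := by
    rw [PySem.List.pyGetD_of_nonneg _ _ (by positivity)]
    simpa using pv_preY_getD l LO hLOle
  rw [hcount, hlen, hlo, hhi, hgethi, hgetlo]
  by_cases h : LO < HI
  · rw [if_pos (by exact_mod_cast h)]
    have hsplit : l.take HI = l.take LO ++ (l.drop LO).take (HI - LO) := by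
      have hh : HI = LO + (HI - LO) := by omega
      rw [hh, List.take_add]
      simp
    have hcnt : ((l.take HI).count 'Y' : Int)
        = ((l.take LO).count 'Y' : Int) + (((l.drop LO).take (HI - LO)).count 'Y' : Int) := by
      rw [hsplit, List.count_append]; push_cast; ring
    have hlensub : ((l.drop LO).take (HI - LO)).length = HI - LO := by
      simp only [List.length_take, List.length_drop]
      omega
    rw [hlensub]
    simp only [Prod.mk.injEq]
    exact ⟨by omega, by omega⟩
  · rw [if_neg (by exact_mod_cast h)]
    have hz : HI - LO = 0 := by omega
    rw [hz]
    simp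

-- A's filtered loop over all regions equals B's loop over the pre-filtered list
theorem pv_loop_eq (sequence : String) (features : List String)
    (l : List (List (String × String))) (p0 : Int × Int) :
    l.foldl (fun (p : Int × Int) topoDict =>
        if features.contains (pvDesc topoDict) then
          let roi := pvRoi sequence topoDict
          (p.1 + (PySem.Str.count roi "Y" : Int), p.2 + PySem.Str.len roi)
        else p) p0
      = (l.filter (fun d => features.contains (pvDesc d))).foldl (fun (p : Int × Int) d =>
          let lo := pvNorm (pvIntAt d "begin" - 1) (PySem.Str.len sequence)
          let hi := pvNorm (pvIntAt d "end") (PySem.Str.len sequence)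
          if lo < hi then
            (p.1 + (PySem.List.pyGetD (pvPreY sequence.toList) hi 0
                    - PySem.List.pyGetD (pvPreY sequence.toList) lo 0),
             p.2 + (hi - lo))
          else p) p0 := by
  induction l generalizing p0 with
  | nil => rfl
  | cons d t ih =>
      by_cases h : features.contains (pvDesc d) = true
      · simp only [List.foldl_cons, List.filter_cons, h, if_true]
        rw [ih, pv_step_eq]
      · simp only [List.foldl_cons, List.filter_cons, h, Bool.false_eq_true, if_false]
        exact ih p0

-- ===== VERDICT (by name: the statement is the Claim_ definition above) =====
theorem countTyr_spec : Claim_equal_countTyr := by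
  intro sequence topoArr features _hdom _hpre
  unfold Spec_countTyr
  match topoArr with
  | [] => rfl
  | [d] =>
      show _ = countTyr_alt sequence [d] features
      unfold countTyr countTyr_alt
      simp only [List.length_cons, List.length_nil, beq_self_eq_true, if_true,
        List.foldl_cons, List.foldl_nil]
      have h := pv_step_eq sequence d ((0 : Int), (0 : Int))
      simp only at h
      rw [← h]
  | d1 :: d2 :: t =>
      show _ = countTyr_alt sequence (d1 :: d2 :: t) features
      unfold countTyr countTyr_alt
      have hlen : ((d1 :: d2 :: t).length == 1) = false := by simp
      simp only [hlen, Bool.false_eq_true, if_false]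
      rw [pv_loop_eq]
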